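-- pv_equiv track=rewrite | github.com/tzurshubi/BiHS | src/cib_inside_app.py | check_snake_violation
-- ===== SOURCE A (Python) =====
-- def hamming_distance(a: str, b: str) -> int:
--     return sum(ch1 != ch2 for ch1, ch2 in zip(a, b))
--
-- def check_snake_violation(visited, new_vertex: str, start_vertex: str,
--                           ignore_start_neighbor: bool = False) -> bool:
--     """
--     Snake in the box constraint:
--     - No vertex may repeat.
--     - No nonconsecutive pair of vertices in the path may have Hamming distance 1.
--     If ignore_start_neighbor is True, we ignore chords between new_vertex
--     and start_vertex. This is used when new_vertex is a neighbor of 0...0,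
--     so that such a move does not end the game.
--     """
--     if not visited:
--         return False
--
--     # Revisit of any previous vertex is not allowed
--     if new_vertex in visited:
--         return True
--
--     last_vertex = visited[-1]
--
--     for v in visited[:-1]:
--         if ignore_start_neighbor and v == start_vertex:
--             continue
--         if hamming_distance(v, new_vertex) == 1:
--             # chord between nonconsecutive vertices
--             return True
--
--     # Edge between last_vertex and new_vertex has distance 1, and that is allowed
--     return False
-- ===== SOURCE B (Python) =====
-- def check_snake_violation(visited, new_vertex: str, start_vertex: str,
--                           ignore_start_neighbor: bool = False) -> bool:
--     # Stage 1: revisit check; stage 2: build the candidate list (drop the last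
--     # vertex, and filter out the start vertex when ignored); stage 3: detect a
--     # Hamming-distance-1 chord by locating the longest common prefix and then
--     # comparing the remaining windows as whole strings (no mismatch counting).
--     if new_vertex in visited:
--         return True
--     candidates = visited[:-1]
--     if ignore_start_neighbor:
--         candidates = [v for v in candidates if v != start_vertex]
--     L = len(new_vertex)
--     for v in candidates:
--         m = min(len(v), L)
--         i = 0
--         while i < m and v[i] == new_vertex[i]:
--             i += 1
--         if i < m and v[i + 1:m] == new_vertex[i + 1:m]:
--             return True
--     return False
-- ===== Notes on version B (the rewrite author's own statement) =====
-- stated objective: alternative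
-- what changed: B replaces A's per-vertex mismatch-summing Hamming distance with a longest-common-prefix search followed by a single whole-slice equality test of the remaining window, and moves the start-vertex skip out of the loop into a separate filtering pass.
import Mathlib
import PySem

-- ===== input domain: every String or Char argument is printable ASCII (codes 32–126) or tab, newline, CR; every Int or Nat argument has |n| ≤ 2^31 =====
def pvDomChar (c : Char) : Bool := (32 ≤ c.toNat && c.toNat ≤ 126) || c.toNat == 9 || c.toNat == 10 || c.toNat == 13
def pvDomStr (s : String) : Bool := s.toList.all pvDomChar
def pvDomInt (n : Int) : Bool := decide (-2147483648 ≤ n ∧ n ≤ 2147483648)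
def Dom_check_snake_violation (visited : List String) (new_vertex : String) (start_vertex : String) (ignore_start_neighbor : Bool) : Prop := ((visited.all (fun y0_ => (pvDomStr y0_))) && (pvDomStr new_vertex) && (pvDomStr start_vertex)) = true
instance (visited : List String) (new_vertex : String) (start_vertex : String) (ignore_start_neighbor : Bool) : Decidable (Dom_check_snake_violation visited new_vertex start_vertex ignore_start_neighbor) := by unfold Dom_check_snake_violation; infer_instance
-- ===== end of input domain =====

-- B replaces A's mismatch-summing Hamming distance with a longest-common-prefix
-- search plus one whole-window slice equality, and filters the start vertex in a
-- separate pass; objective: alternative structure (same asymptotic cost).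


-- ===== PORT A =====
-- hamming_distance(a, b) = sum(ch1 != ch2 for ch1, ch2 in zip(a, b))
def hamming_distance (a : String) (b : String) : Int :=
  (List.zip a.toList b.toList).foldl (fun acc p => acc + (if p.1 ≠ p.2 then 1 else 0)) 0

-- the 'for v in visited[:-1]' loop with its 'continue' and early 'return True'
def chordLoopA (vs : List String) (new_vertex start_vertex : String) (ign : Bool) : Bool :=
  match vs with
  | [] => false
  | v :: rest =>
    if ign && v == start_vertex then chordLoopA rest new_vertex start_vertex ign
    else if hamming_distance v new_vertex == 1 then true
    else chordLoopA rest new_vertex start_vertex ign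

def check_snake_violation (visited : List String) (new_vertex : String) (start_vertex : String) (ignore_start_neighbor : Bool) : Bool :=
  if visited = [] then false
  else if visited.contains new_vertex then true
  else chordLoopA (PySem.List.slice visited none (some (-1))) new_vertex start_vertex ignore_start_neighbor

-- ===== PORT B =====
-- the 'while i < m and v[i] == new_vertex[i]: i += 1' scan (stops at min length = m)
def lcpLen (xs ys : List Char) : Nat :=
  match xs, ys with
  | x :: xs', y :: ys' => if x = y then lcpLen xs' ys' + 1 else 0
  | _, _ => 0

-- 'i < m and v[i+1:m] == new_vertex[i+1:m]' (string slicing on code points, exact on ASCII and beyond)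
def ham1_by_lcp (v nv : String) : Bool :=
  let xs := v.toList
  let ys := nv.toList
  let m := min xs.length ys.length
  let i := lcpLen xs ys
  decide (i < m) &&
    (PySem.List.slice xs (some ((i : Int) + 1)) (some ((m : Nat) : Int)) ==
     PySem.List.slice ys (some ((i : Int) + 1)) (some ((m : Nat) : Int)))

def check_snake_violation_alt (visited : List String) (new_vertex : String) (start_vertex : String) (ignore_start_neighbor : Bool) : Bool :=
  if visited.contains new_vertex then true
  else
    let candidates := PySem.List.slice visited none (some (-1))
    let candidates := if ignore_start_neighbor then candidates.filter (fun v => v ≠ start_vertex) else candidates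
    candidates.any (fun v => ham1_by_lcp v new_vertex)

-- ===== PRECONDITION & SPEC =====
def Spec_check_snake_violation (visited : List String) (new_vertex : String) (start_vertex : String) (ignore_start_neighbor : Bool) (out : Bool) : Prop := out = check_snake_violation_alt visited new_vertex start_vertex ignore_start_neighbor
instance (visited : List String) (new_vertex : String) (start_vertex : String) (ignore_start_neighbor : Bool) (out : Bool) : Decidable (Spec_check_snake_violation visited new_vertex start_vertex ignore_start_neighbor out) := by unfold Spec_check_snake_violation; infer_instance

-- ===== CLAIM (what is proved, stated in full; the proofs are below) =====
def Claim_equal_check_snake_violation : Prop := ∀ (visited : List String) (new_vertex : String) (start_vertex : String) (ignore_start_neighbor : Bool), Dom_check_snake_violation visited new_vertex start_vertex ignore_start_neighbor → Spec_check_snake_violation visited new_vertex start_vertex ignore_start_neighbor (check_snake_violation visited new_vertex start_vertex ignore_start_neighbor)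

-- ===== LEMMAS AND PROOFS =====

-- Nat-valued Hamming distance of two char lists (proof-side reference value)
def ham (xs ys : List Char) : Nat :=
  match xs, ys with
  | x :: xs', y :: ys' => (if x ≠ y then 1 else 0) + ham xs' ys'
  | _, _ => 0

theorem hamming_distance_eq_ham (a b : String) : hamming_distance a b = (ham a.toList b.toList : Int) := by
  unfold hamming_distance
  generalize a.toList = xs; generalize b.toList = ys
  suffices h : ∀ (xs ys : List Char) (acc : Int),
      (List.zip xs ys).foldl (fun acc p => acc + (if p.1 ≠ p.2 then 1 else 0)) acc
        = acc + (ham xs ys : Int) by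
    simpa using h xs ys 0
  intro xs
  induction xs with
  | nil => intro ys acc; cases ys <;> simp [ham]
  | cons x xs' ih =>
    intro ys acc
    cases ys with
    | nil => simp [ham]
    | cons y ys' =>
      simp only [List.zip_cons_cons, List.foldl_cons, ham, ih]
      push_cast
      split_ifs <;> ring

theorem ham_zero_iff (xs : List Char) : ∀ ys : List Char,
    (ham xs ys = 0) ↔ xs.take (min xs.length ys.length) = ys.take (min xs.length ys.length) := by
  induction xs with
  | nil => intro ys; cases ys <;> simp [ham]
  | cons x xs' ih =>
    intro ys
    cases ys with
    | nil => simp [ham]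
    | cons y ys' =>
      have hm : min (x :: xs').length (y :: ys').length = min xs'.length ys'.length + 1 := by
        simp only [List.length_cons]; omega
      by_cases hxy : x = y
      · simp [ham, hxy, ih ys', List.take_succ_cons]
      · simp [ham, hxy, List.take_succ_cons]

theorem ham1_by_lcp_key (xs : List Char) : ∀ ys : List Char,
    (decide (lcpLen xs ys < min xs.length ys.length) &&
      (PySem.List.slice xs (some ((lcpLen xs ys : Int) + 1)) (some ((min xs.length ys.length : Nat) : Int)) ==
       PySem.List.slice ys (some ((lcpLen xs ys : Int) + 1)) (some ((min xs.length ys.length : Nat) : Int))))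
    = (ham xs ys == 1) := by
  induction xs with
  | nil => intro ys; cases ys <;> simp [lcpLen, ham]
  | cons x xs' ih =>
    intro ys
    cases ys with
    | nil => simp [lcpLen, ham]
    | cons y ys' =>
      have hm : min (x :: xs').length (y :: ys').length = min xs'.length ys'.length + 1 := by
        simp only [List.length_cons]; omega
      by_cases hxy : x = y
      · have hl : lcpLen (x :: xs') (y :: ys') = lcpLen xs' ys' + 1 := by
          simp [lcpLen, hxy]
        have hc1 : ((lcpLen xs' ys' + 1 : Nat) : Int) + 1 = ((lcpLen xs' ys' + 2 : Nat) : Int) := by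
          push_cast; ring
        have hs1 : PySem.List.slice (x :: xs') (some ((lcpLen xs' ys' + 2 : Nat) : Int))
            (some ((min xs'.length ys'.length + 1 : Nat) : Int))
            = PySem.List.slice xs' (some ((lcpLen xs' ys' : Int) + 1)) (some ((min xs'.length ys'.length : Nat) : Int)) := by
          rw [PySem.List.slice_natCast, show ((lcpLen xs' ys' : Int) + 1) = ((lcpLen xs' ys' + 1 : Nat) : Int) by push_cast; ring,
            PySem.List.slice_natCast]
          simp [List.drop_succ_cons]
        have hs2 : PySem.List.slice (y :: ys') (some ((lcpLen xs' ys' + 2 : Nat) : Int))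
            (some ((min xs'.length ys'.length + 1 : Nat) : Int))
            = PySem.List.slice ys' (some ((lcpLen xs' ys' : Int) + 1)) (some ((min xs'.length ys'.length : Nat) : Int)) := by
          rw [PySem.List.slice_natCast, show ((lcpLen xs' ys' : Int) + 1) = ((lcpLen xs' ys' + 1 : Nat) : Int) by push_cast; ring,
            PySem.List.slice_natCast]
          simp [List.drop_succ_cons]
        have hham : ham (x :: xs') (y :: ys') = ham xs' ys' := by simp [ham, hxy]
        rw [hl, hm, hc1, hs1, hs2, hham, ← ih ys']
        have hdec : decide (lcpLen xs' ys' + 1 < min xs'.length ys'.length + 1)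
            = decide (lcpLen xs' ys' < min xs'.length ys'.length) := by simp
        rw [hdec]
      · have hl : lcpLen (x :: xs') (y :: ys') = 0 := by simp [lcpLen, hxy]
        have hc0 : ((0 : Nat) : Int) + 1 = ((1 : Nat) : Int) := by norm_num
        have hs1 : PySem.List.slice (x :: xs') (some ((1 : Nat) : Int))
            (some ((min xs'.length ys'.length + 1 : Nat) : Int))
            = xs'.take (min xs'.length ys'.length) := by
          rw [PySem.List.slice_natCast]; simp
        have hs2 : PySem.List.slice (y :: ys') (some ((1 : Nat) : Int))
            (some ((min xs'.length ys'.length + 1 : Nat) : Int))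
            = ys'.take (min xs'.length ys'.length) := by
          rw [PySem.List.slice_natCast]; simp
        have hham : ham (x :: xs') (y :: ys') = 1 + ham xs' ys' := by simp [ham, hxy]
        rw [hl, hm, hc0, hs1, hs2, hham]
        have hzero := ham_zero_iff xs' ys'
        simp only [Nat.zero_lt_succ, decide_true, Bool.true_and]
        by_cases h0 : ham xs' ys' = 0
        · simp [h0, hzero.mp h0]
        · have hne : ¬ (xs'.take (min xs'.length ys'.length) = ys'.take (min xs'.length ys'.length)) := by
            intro hc; exact h0 (hzero.mpr hc)
          simp [hne]
          exact h0

theorem ham1_by_lcp_eq (v nv : String) : ham1_by_lcp v nv = (ham v.toList nv.toList == 1) := by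
  unfold ham1_by_lcp
  exact ham1_by_lcp_key v.toList nv.toList

theorem chordLoopA_eq_filtered (vs : List String) (nv sv : String) (ign : Bool) :
    chordLoopA vs nv sv ign
      = (if ign then vs.filter (fun v => v ≠ sv) else vs).any (fun v => ham1_by_lcp v nv) := by
  induction vs with
  | nil => cases ign <;> simp [chordLoopA]
  | cons v rest ih =>
    have hdist : (hamming_distance v nv == 1) = ham1_by_lcp v nv := by
      rw [ham1_by_lcp_eq, hamming_distance_eq_ham]
      by_cases h : ham v.toList nv.toList = 1
      · simp [h]
      · have h2 : ¬ ((ham v.toList nv.toList : Int) = 1) := by exact_mod_cast h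
        simp [h, h2]
    cases ign with
    | false =>
      simp only [chordLoopA, Bool.false_and, Bool.false_eq_true, if_false, ih, if_false,
        List.any_cons, hdist]
      by_cases h : ham1_by_lcp v nv = true
      · simp [h]
      · simp only [Bool.not_eq_true] at h; simp [h]
    | true =>
      by_cases hsv : (v == sv) = true
      · have hne : ¬ (v ≠ sv) := by simpa using eq_of_beq hsv
        simp only [chordLoopA, Bool.true_and, hsv, if_true, ih, if_true,
          List.filter_cons, decide_eq_true_eq]
        simp [hne]
      · have hne : v ≠ sv := by simpa using hsv
        simp only [chordLoopA, Bool.true_and, hsv, Bool.false_eq_true, if_false, ih, if_true,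
          List.filter_cons, decide_eq_true_eq, hdist]
        simp only [if_pos hne, List.any_cons]
        by_cases h : ham1_by_lcp v nv = true
        · simp [h]
        · simp only [Bool.not_eq_true] at h; simp [h]

theorem check_snake_violation_eq (visited : List String) (nv sv : String) (ign : Bool) :
    check_snake_violation visited nv sv ign = check_snake_violation_alt visited nv sv ign := by
  unfold check_snake_violation check_snake_violation_alt
  cases visited with
  | nil => simp [PySem.List.slice_to_neg_one]
  | cons h t =>
    simp only [List.cons_ne_nil, if_false]
    by_cases hc : (h :: t).contains nv = true
    · simp only [hc]; simp
    · simp only [Bool.not_eq_true] at hc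
      simp only [hc, Bool.false_eq_true, if_false]
      exact chordLoopA_eq_filtered _ nv sv ign

-- ===== VERDICT (by name: the statement is the Claim_ definition above) =====
theorem check_snake_violation_spec : Claim_equal_check_snake_violation := by
  intro visited nv sv ign _
  unfold Spec_check_snake_violation
  exact check_snake_violation_eq visited nv sv ign
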